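-- pv_equiv track=rewrite | github.com/Jaesang98/CodingTest | Programmers/Python3/LV0/02-01.py | solution
-- ===== SOURCE A (Python) =====
-- def solution(n):
--     answer = 0
--     if n % 2 == 0 :
--         for i in range(1,n+1) :
--             if i % 2 == 0 :
--                 answer += i*i
--     else :
--         for i in range(1,n+1) :
--             if i % 2 != 0 :
--                 answer += i
--     return answer
-- ===== SOURCE B (Python) =====
-- def solution(n):
--     if n % 2 == 0:
--         m = max(n, 0) // 2                    # number of even terms 2,4,...,2m
--         return 2 * m * (m + 1) * (2 * m + 1) // 3   # sum of (2k)^2 for k=1..m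
--     k = (max(n, 0) + 1) // 2                  # number of odd terms 1,3,...,2k-1
--     return k * k                              # sum of first k odd numbers
-- ===== Notes on version B (the rewrite author's own statement) =====
-- stated objective: faster
-- what changed: Replaced the O(n) loop over range(1,n+1) by closed-form arithmetic: the square-pyramidal formula for the sum of squares of evens and k^2 for the sum of the first k odds.
import Mathlib
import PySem

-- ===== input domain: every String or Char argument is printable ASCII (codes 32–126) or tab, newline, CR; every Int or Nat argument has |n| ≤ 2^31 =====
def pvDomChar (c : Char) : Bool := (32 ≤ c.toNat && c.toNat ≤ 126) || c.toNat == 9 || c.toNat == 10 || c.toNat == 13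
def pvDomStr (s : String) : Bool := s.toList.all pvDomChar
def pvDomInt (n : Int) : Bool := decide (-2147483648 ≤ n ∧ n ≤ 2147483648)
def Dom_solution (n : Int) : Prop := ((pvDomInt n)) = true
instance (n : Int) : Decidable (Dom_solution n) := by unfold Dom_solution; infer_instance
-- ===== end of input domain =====

-- B replaces A's O(n) loop by closed-form formulas per parity (faster, asymptotic).

-- ===== PORT A =====
def solution (n : Int) : Int :=
  if PySem.Int.mod n 2 = 0 then
    (PySem.List.pyRange 1 (n + 1) 1).foldl
      (fun answer i => if PySem.Int.mod i 2 = 0 then answer + i * i else answer) 0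
  else
    (PySem.List.pyRange 1 (n + 1) 1).foldl
      (fun answer i => if PySem.Int.mod i 2 ≠ 0 then answer + i else answer) 0

-- ===== PORT B =====
def solution_alt (n : Int) : Int :=
  if PySem.Int.mod n 2 = 0 then
    let m := PySem.Int.floordiv (max n 0) 2
    PySem.Int.floordiv (2 * m * (m + 1) * (2 * m + 1)) 3
  else
    let k := PySem.Int.floordiv (max n 0 + 1) 2
    k * k

-- ===== PRECONDITION & SPEC =====
def Spec_solution (n : Int) (out : Int) : Prop := out = solution_alt n
instance (n : Int) (out : Int) : Decidable (Spec_solution n out) := by unfold Spec_solution; infer_instance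

-- ===== CLAIM (what is proved, stated in full; the proofs are below) =====
def Claim_equal_solution : Prop := ∀ (n : Int), Dom_solution n → Spec_solution n (solution n)

-- ===== LEMMAS AND PROOFS =====

lemma foldE_closed (N : ℕ) :
    3 * ((PySem.List.pyRange 1 ((N : Int) + 1) 1).foldl
      (fun answer i => if PySem.Int.mod i 2 = 0 then answer + i * i else answer) 0)
    = 2 * ((N / 2 : ℕ) : Int) * (((N / 2 : ℕ) : Int) + 1) * (2 * ((N / 2 : ℕ) : Int) + 1) := by
  induction N with
  | zero => rw [PySem.List.pyRange_one_eq_nil (by norm_num)]; simp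
  | succ N ih =>
    have h : ((N + 1 : ℕ) : Int) + 1 = ((N : Int) + 1) + 1 := by push_cast; ring
    rw [h, PySem.List.pyRange_one_succ_right (by omega), List.foldl_append]
    simp only [List.foldl]
    rw [PySem.Int.mod_eq_emod_of_pos (by norm_num)]
    rcases Nat.even_or_odd N with ⟨m, hm⟩ | ⟨m, hm⟩
    · -- N even: N+1 is odd, term skipped, N/2 unchanged
      have h2 : ¬ ((N : Int) + 1) % 2 = 0 := by omega
      rw [if_neg h2]
      have hq : (((N + 1) / 2 : ℕ) : Int) = ((N / 2 : ℕ) : Int) := by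
        have : ((N + 1) / 2 : ℕ) = (N / 2 : ℕ) := by omega
        exact_mod_cast this
      rw [hq]; exact ih
    · -- N odd: N+1 is even, add (N+1)^2
      have h2 : ((N : Int) + 1) % 2 = 0 := by omega
      rw [if_pos h2]
      have hq : (((N + 1) / 2 : ℕ) : Int) = ((m : ℕ) : Int) + 1 := by
        have : ((N + 1) / 2 : ℕ) = m + 1 := by omega
        exact_mod_cast this
      have hq2 : ((N / 2 : ℕ) : Int) = ((m : ℕ) : Int) := by
        have : (N / 2 : ℕ) = m := by omega
        exact_mod_cast this
      have hN : (N : Int) = 2 * (m : Int) + 1 := by exact_mod_cast hm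
      rw [hq]
      rw [hq2] at ih
      linear_combination ih + (3 * (N : Int) + 6 * (m : Int) + 9) * hN

lemma foldO_closed (N : ℕ) :
    ((PySem.List.pyRange 1 ((N : Int) + 1) 1).foldl
      (fun answer i => if PySem.Int.mod i 2 ≠ 0 then answer + i else answer) 0)
    = (((N + 1) / 2 : ℕ) : Int) * (((N + 1) / 2 : ℕ) : Int) := by
  induction N with
  | zero => rw [PySem.List.pyRange_one_eq_nil (by norm_num)]; simp
  | succ N ih =>
    have h : ((N + 1 : ℕ) : Int) + 1 = ((N : Int) + 1) + 1 := by push_cast; ring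
    rw [h, PySem.List.pyRange_one_succ_right (by omega), List.foldl_append]
    simp only [List.foldl]
    rw [PySem.Int.mod_eq_emod_of_pos (by norm_num)]
    rcases Nat.even_or_odd N with ⟨m, hm⟩ | ⟨m, hm⟩
    · -- N even: N+1 is odd, add it
      have h2 : ((N : Int) + 1) % 2 ≠ 0 := by omega
      rw [if_pos h2]
      have hq : (((N + 1 + 1) / 2 : ℕ) : Int) = ((m : ℕ) : Int) + 1 := by
        have : ((N + 1 + 1) / 2 : ℕ) = m + 1 := by omega
        exact_mod_cast this
      have hq2 : (((N + 1) / 2 : ℕ) : Int) = ((m : ℕ) : Int) := by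
        have : ((N + 1) / 2 : ℕ) = m := by omega
        exact_mod_cast this
      have hN : (N : Int) = (m : Int) + (m : Int) := by exact_mod_cast hm
      rw [hq]
      rw [hq2] at ih
      rw [ih]
      linear_combination hN
    · -- N odd: N+1 is even, skipped
      have h2 : ¬ ((N : Int) + 1) % 2 ≠ 0 := by omega
      rw [if_neg h2]
      have hq : (((N + 1 + 1) / 2 : ℕ) : Int) = (((N + 1) / 2 : ℕ) : Int) := by
        have : ((N + 1 + 1) / 2 : ℕ) = ((N + 1) / 2 : ℕ) := by omega
        exact_mod_cast this
      rw [hq]; exact ih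

lemma floordiv_three_mul (a : Int) : PySem.Int.floordiv (3 * a) 3 = a := by
  rw [PySem.Int.floordiv_eq_ediv_of_pos (by norm_num)]
  omega

-- ===== VERDICT (by name: the statement is the Claim_ definition above) =====
theorem solution_spec : Claim_equal_solution := by
  intro n _
  unfold Spec_solution solution solution_alt
  dsimp only
  rcases le_or_gt n 0 with hle | hpos
  · rw [PySem.List.pyRange_one_eq_nil (by omega)]
    have hmax : max n 0 = 0 := by omega
    rw [hmax]
    split
    · simp
    · simp
  · have hmax : max n 0 = n := by omega
    rw [hmax]
    have hN : n = ((n.toNat : ℕ) : Int) := by omega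
    split
    · have h3 := foldE_closed n.toNat
      rw [← hN] at h3
      have hm : PySem.Int.floordiv n 2 = ((n.toNat / 2 : ℕ) : Int) := by
        rw [PySem.Int.floordiv_eq_ediv_of_pos (by norm_num)]; omega
      rw [hm, ← h3, floordiv_three_mul]
    · have h1 := foldO_closed n.toNat
      rw [← hN] at h1
      have hk : PySem.Int.floordiv (n + 1) 2 = (((n.toNat + 1) / 2 : ℕ) : Int) := by
        rw [PySem.Int.floordiv_eq_ediv_of_pos (by norm_num)]; omega
      rw [hk, h1]
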